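-- pv_equiv track=rewrite | github.com/mikkelkrogsholm/maskemania | skills/strikning/knitlib/constructions/half_pi_shawl.py | pi_shawl_progression
-- ===== SOURCE A (Python) =====
-- def pi_shawl_progression(
--     n_doublings: int, edge_sts: int = 4
-- ) -> list[tuple[int, int, int]]:
--     """Compute the half-pi progression.
--
--     Returns a list of tuples (band_index, plain_rows_in_band, center_sts_after).
--     band_index 0 is the cast-on band (no doubling yet); subsequent bands
--     each begin with a doubling round.
--
--     Verified: n_doublings=6, edge=4 →
--         [(0, 1, 0), (1, 3, 3), (2, 6, 9), (3, 12, 21), (4, 24, 45),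
--          (5, 48, 93), (6, 96, 189)]
--     Each band's *total* stitches = center_sts + 2*edge_sts, with row 1 of
--     band having an extra YO at each end vs. row 0 (= +1 inside center).
--     """
--     if n_doublings < 0:
--         raise ValueError("n_doublings must be >= 0")
--     if edge_sts < 0:
--         raise ValueError("edge_sts must be >= 0")
--     progression: list[tuple[int, int, int]] = []
--     # Band 0: cast-on (3 sts at neck) → pickup gives 4+0+4 = 8 sts, but
--     # before the first doubling the center is "0" (just the joint).
--     progression.append((0, 1, 0))
--     plain_rows = 3
--     center = 0
--     for band in range(1, n_doublings + 1):
--         center = 2 * center + 3  # see derivation in test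
--         progression.append((band, plain_rows, center))
--         plain_rows *= 2
--     return progression
-- ===== SOURCE B (Python) =====
-- def pi_shawl_progression(
--     n_doublings: int, edge_sts: int = 4
-- ) -> list[tuple[int, int, int]]:
--     """Closed-form band progression: band b>=1 is (b, 3*2**(b-1), 3*(2**b - 1))."""
--     if n_doublings < 0:
--         raise ValueError("n_doublings must be >= 0")
--     if edge_sts < 0:
--         raise ValueError("edge_sts must be >= 0")
--     return [(0, 1, 0)] + [
--         (b, 3 << (b - 1), (3 << b) - 3) for b in range(1, n_doublings + 1)
--     ]
-- ===== Notes on version B (the rewrite author's own statement) =====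
-- stated objective: simpler
-- what changed: Replaces the running recurrence (center = 2*center+3, plain_rows *= 2, list.append) with a closed form per band index: each band b>=1 is computed independently as (b, 3<<(b-1), (3<<b)-3) in a single comprehension.
import Mathlib
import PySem

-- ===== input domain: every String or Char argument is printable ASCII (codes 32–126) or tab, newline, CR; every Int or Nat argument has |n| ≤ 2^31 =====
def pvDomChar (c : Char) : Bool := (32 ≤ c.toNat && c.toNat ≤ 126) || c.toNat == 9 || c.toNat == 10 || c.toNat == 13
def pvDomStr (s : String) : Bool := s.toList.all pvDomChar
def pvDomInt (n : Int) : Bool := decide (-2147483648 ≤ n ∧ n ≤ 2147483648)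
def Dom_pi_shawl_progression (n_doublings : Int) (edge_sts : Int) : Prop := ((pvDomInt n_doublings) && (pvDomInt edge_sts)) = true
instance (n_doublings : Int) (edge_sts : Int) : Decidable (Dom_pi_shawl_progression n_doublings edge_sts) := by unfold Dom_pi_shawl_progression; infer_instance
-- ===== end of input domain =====

-- B replaces A's running recurrence with an independent closed form per band (objective: simpler).

-- ===== PORT A =====
-- A: append band 0, then a loop carrying (progression, plain_rows, center) with
-- center = 2*center + 3 and plain_rows *= 2 each band.
def pi_shawl_progression (n_doublings : Int) (edge_sts : Int) : List (Int × Int × Int) :=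
  let st :=
    (PySem.List.pyRange 1 (n_doublings + 1) 1).foldl
      (fun (st : List (Int × Int × Int) × Int × Int) band =>
        let center := 2 * st.2.2 + 3
        (st.1 ++ [(band, st.2.1, center)], st.2.1 * 2, center))
      ([(0, 1, 0)], 3, 0)
  st.1

-- ===== PORT B =====
-- B: band 0 literal, then each band b computed independently by the closed form.
def pi_shawl_progression_alt (n_doublings : Int) (edge_sts : Int) : List (Int × Int × Int) :=
  (0, 1, 0) ::
    (PySem.List.pyRange 1 (n_doublings + 1) 1).map
      (fun b => (b, 3 * 2 ^ (b - 1).toNat, 3 * 2 ^ b.toNat - 3))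

-- ===== PRECONDITION & SPEC =====
-- A raises ValueError when n_doublings < 0 or edge_sts < 0; exactly those inputs are excluded.
def Pre_pi_shawl_progression (n_doublings : Int) (edge_sts : Int) : Prop :=
  0 ≤ n_doublings ∧ 0 ≤ edge_sts
instance (n_doublings : Int) (edge_sts : Int) : Decidable (Pre_pi_shawl_progression n_doublings edge_sts) := by
  unfold Pre_pi_shawl_progression; infer_instance
def pvWitness_pi_shawl_progression : Int × Int := (6, 4)

def Spec_pi_shawl_progression (n_doublings : Int) (edge_sts : Int) (out : List (Int × Int × Int)) : Prop := out = pi_shawl_progression_alt n_doublings edge_sts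
instance (n_doublings : Int) (edge_sts : Int) (out : List (Int × Int × Int)) : Decidable (Spec_pi_shawl_progression n_doublings edge_sts out) := by unfold Spec_pi_shawl_progression; infer_instance

-- ===== CLAIM (what is proved, stated in full; the proofs are below) =====
def Claim_equal_pi_shawl_progression : Prop := ∀ (n_doublings : Int) (edge_sts : Int), Dom_pi_shawl_progression n_doublings edge_sts → Pre_pi_shawl_progression n_doublings edge_sts → Spec_pi_shawl_progression n_doublings edge_sts (pi_shawl_progression n_doublings edge_sts)

-- ===== LEMMAS AND PROOFS =====

-- Loop invariant: after m bands the state is the mapped prefix together with 3*2^m and 3*(2^m-1).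
theorem pi_shawl_fold_inv (m : Nat) :
    (PySem.List.pyRange 1 ((m : Int) + 1) 1).foldl
      (fun (st : List (Int × Int × Int) × Int × Int) band =>
        let center := 2 * st.2.2 + 3
        (st.1 ++ [(band, st.2.1, center)], st.2.1 * 2, center))
      ([(0, 1, 0)], 3, 0)
    = ((0, 1, 0) ::
        (PySem.List.pyRange 1 ((m : Int) + 1) 1).map
          (fun b => (b, 3 * 2 ^ (b - 1).toNat, 3 * 2 ^ b.toNat - 3)),
       3 * 2 ^ m, 3 * (2 ^ m - 1)) := by
  induction m with
  | zero => simp [PySem.List.pyRange_one_eq_nil]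
  | succ k ih =>
    have h : PySem.List.pyRange 1 ((k : Int) + 1 + 1) 1
        = PySem.List.pyRange 1 ((k : Int) + 1) 1 ++ [(k : Int) + 1] := by
      have := PySem.List.pyRange_one_succ_right (a := 1) (b := (k : Int) + 1) (by omega)
      simpa using this
    have hk1 : (((k : Int) + 1) - 1).toNat = k := by omega
    have hk2 : ((k : Int) + 1).toNat = k + 1 := by omega
    push_cast
    rw [h, List.foldl_append, List.map_append, ih]
    simp only [List.foldl_cons, List.foldl_nil, List.map_cons, List.map_nil, hk1, hk2]
    refine Prod.ext ?_ (Prod.ext ?_ ?_) <;> simp <;> ring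

-- ===== VERDICT (by name: the statement is the Claim_ definition above) =====
theorem pi_shawl_progression_spec : Claim_equal_pi_shawl_progression := by
  intro n e _ hpre
  obtain ⟨hn, _⟩ := hpre
  unfold Spec_pi_shawl_progression pi_shawl_progression pi_shawl_progression_alt
  obtain ⟨m, rfl⟩ := Int.eq_ofNat_of_zero_le hn
  simp only [pi_shawl_fold_inv m]
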